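-- pv_equiv track=rewrite | github.com/alias454/YATSEE | src/yatsee/transcript/normalize.py | merge_fragment_lines
-- ===== SOURCE A (Python) =====
-- from typing import Any, Dict, List, Optional
--
-- def merge_fragment_lines(lines: List[str]) -> List[str]:
--     """
--     Merge obviously incomplete fragment lines into the previous line when safe.
--
--     This helps reduce ugly sentence-per-line output where a fragment like
--     'for the city council' ends up isolated.
--
--     :param lines: Sentence or line list
--     :return: Smoothed line list
--     """
--     if not lines:
--         return lines
--
--     merged: List[str] = []
--     for line in lines:
--         if merged and line and line[0].islower():
--             merged[-1] = f"{merged[-1]} {line}".strip()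
--         else:
--             merged.append(line)
--     return merged
-- ===== SOURCE B (Python) =====
-- from typing import List
--
--
-- def _collapse(run: List[str]) -> str:
--     """Fold a run into one line, stripping at each pairwise merge (singletons untouched)."""
--     acc = run[0]
--     for line in run[1:]:
--         acc = f"{acc} {line}".strip()
--     return acc
--
--
-- def merge_fragment_lines(lines: List[str]) -> List[str]:
--     """Two-phase: group lines into runs (a new run starts at an empty or
--     non-lowercase-initial line), then collapse each run to one output line."""
--     if not lines:
--         return lines
--     runs: List[List[str]] = []
--     cur: List[str] = [lines[0]]
--     for line in lines[1:]:
--         if line and line[0].islower():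
--             cur.append(line)
--         else:
--             runs.append(cur)
--             cur = [line]
--     runs.append(cur)
--     return [_collapse(run) for run in runs]
-- ===== Notes on version B (the rewrite author's own statement) =====
-- stated objective: alternative
-- what changed: Replaces A's interleaved append-or-merge loop over the output list (rewriting merged[-1] in place) with a two-phase group-then-collapse: one pass partitions the input into runs at non-fragment lines, a second pass folds each run into one line.
import Mathlib
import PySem

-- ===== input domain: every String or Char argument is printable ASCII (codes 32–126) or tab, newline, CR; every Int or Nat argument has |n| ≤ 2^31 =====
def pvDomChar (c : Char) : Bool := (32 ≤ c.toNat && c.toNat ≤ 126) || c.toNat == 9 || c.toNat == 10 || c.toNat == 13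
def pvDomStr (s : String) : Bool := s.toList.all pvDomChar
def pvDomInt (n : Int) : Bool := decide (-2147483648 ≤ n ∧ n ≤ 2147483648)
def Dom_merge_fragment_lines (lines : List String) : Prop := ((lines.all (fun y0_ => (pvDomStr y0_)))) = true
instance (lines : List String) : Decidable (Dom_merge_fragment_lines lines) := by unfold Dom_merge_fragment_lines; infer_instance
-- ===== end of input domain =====

-- B replaces A's in-place append-or-merge loop by a group-into-runs pass plus a
-- collapse pass (alternative decomposition, same cost); return values proved equal.

-- ===== PORT A =====
-- `line and line[0].islower()` (shared literal predicate of both Pythons)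
def pvIsFrag (line : String) : Bool :=
  match line.toList with
  | [] => false
  | c :: _ => PySem.Chars.islower c

-- body of A's for-loop: merge into merged[-1] or append
def pvStepA (merged : List String) (line : String) : List String :=
  if !merged.isEmpty && pvIsFrag line then
    merged.dropLast ++ [PySem.Str.strip (merged.getLastD "" ++ " " ++ line)]
  else
    merged ++ [line]

def merge_fragment_lines (lines : List String) : List String :=
  if lines = [] then lines
  else lines.foldl pvStepA []

-- ===== PORT B =====
-- one pairwise merge step of _collapse's loop
def pvMerge2 (acc line : String) : String := PySem.Str.strip (acc ++ " " ++ line)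

-- _collapse: acc = run[0], fold the rest
def pvCollapse (run : List String) : String :=
  match run with
  | [] => ""
  | h :: t => t.foldl pvMerge2 h

-- phase 1 loop: extend the current run `cur` or emit it and start a new one
def pvRunsAux : List String → List String → List (List String)
  | cur, [] => [cur]
  | cur, l :: rest =>
      if pvIsFrag l then pvRunsAux (cur ++ [l]) rest
      else cur :: pvRunsAux [l] rest

def merge_fragment_lines_alt (lines : List String) : List String :=
  match lines with
  | [] => lines
  | h :: t => (pvRunsAux [h] t).map pvCollapse

-- ===== PRECONDITION & SPEC =====
def Spec_merge_fragment_lines (lines : List String) (out : List String) : Prop := out = merge_fragment_lines_alt lines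
instance (lines : List String) (out : List String) : Decidable (Spec_merge_fragment_lines lines out) := by unfold Spec_merge_fragment_lines; infer_instance

-- ===== CLAIM (what is proved, stated in full; the proofs are below) =====
def Claim_equal_merge_fragment_lines : Prop := ∀ (lines : List String), Dom_merge_fragment_lines lines → Spec_merge_fragment_lines lines (merge_fragment_lines lines)

-- ===== LEMMAS AND PROOFS =====
theorem pvCollapse_concat (h : String) (t : List String) (l : String) :
    pvCollapse ((h :: t) ++ [l]) = pvMerge2 (pvCollapse (h :: t)) l := by
  simp [pvCollapse, List.foldl_append]

theorem pvMain (rest : List String) : ∀ (pref : List String) (h : String) (t : List String),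
    rest.foldl pvStepA (pref ++ [pvCollapse (h :: t)]) = pref ++ (pvRunsAux (h :: t) rest).map pvCollapse := by
  induction rest with
  | nil => intro pref h t; simp [pvRunsAux]
  | cons l rest ih =>
    intro pref h t
    by_cases hf : pvIsFrag l = true
    · have hstep : pvStepA (pref ++ [pvCollapse (h :: t)]) l
          = pref ++ [pvCollapse ((h :: t) ++ [l])] := by
        rw [pvCollapse_concat]
        simp [pvStepA, hf, pvMerge2]
      simp only [List.foldl_cons, hstep, pvRunsAux, hf, if_pos]
      exact ih pref h (t ++ [l])
    · have hstep : pvStepA (pref ++ [pvCollapse (h :: t)]) l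
          = (pref ++ [pvCollapse (h :: t)]) ++ [pvCollapse [l]] := by
        simp [pvStepA, hf, pvCollapse]
      simp only [List.foldl_cons, hstep, pvRunsAux, hf]
      rw [ih (pref ++ [pvCollapse (h :: t)]) l []]
      simp

-- ===== VERDICT (by name: the statement is the Claim_ definition above) =====
theorem merge_fragment_lines_spec : Claim_equal_merge_fragment_lines := by
  intro lines _
  unfold Spec_merge_fragment_lines
  cases lines with
  | nil => rfl
  | cons h t =>
    have h0 : pvStepA [] h = [] ++ [pvCollapse [h]] := by
      simp [pvStepA, pvCollapse]
    calc merge_fragment_lines (h :: t)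
        = t.foldl pvStepA (pvStepA [] h) := by
          simp [merge_fragment_lines]
      _ = t.foldl pvStepA ([] ++ [pvCollapse [h]]) := by rw [h0]
      _ = [] ++ (pvRunsAux [h] t).map pvCollapse := pvMain t [] h []
      _ = merge_fragment_lines_alt (h :: t) := by simp [merge_fragment_lines_alt]
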